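-- pv_equiv track=rewrite | github.com/CaioMM/checkPriceKaBuM | priceCheck.py | check1660Super
-- ===== SOURCE A (Python) =====
-- def check1660Super(data):
--     code = ['1','6','6','0','S','U','P','E','R','*']
--     nome = data['nome'].replace(" ","").replace(",","")
--     hit = 0
--     for letra in nome:
--         if letra.upper() == code[0]:
--             code.pop(0)
--             hit += 1
--         elif hit != 0:
--             break
--     return (len(code)==1)
-- ===== SOURCE B (Python) =====
-- def check1660Super(data):
--     nome = data['nome'].replace(" ", "").replace(",", "").upper()
--     i = nome.find('1')
--     if i == -1:
--         return False
--     return nome[i:i+9] == '1660SUPER'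
-- ===== Notes on version B (the rewrite author's own statement) =====
-- stated objective: simpler
-- what changed: A's character-by-character state machine that pops a sentinel-terminated code list is replaced by anchoring at the first '1' of the cleaned uppercased name and comparing one fixed 9-character slice against '1660SUPER'.
-- intended difference: On names whose cleaned uppercased form ends exactly in '1660SUPER*' anchored at the first '1', A returns False because its own '*' sentinel gets consumed, while B returns True; the name does contain the 1660SUPER pattern, so True is the intended value. — e.g. on check1660Super([("nome", "1660SUPER*")]): A returns false, B returns true
import Mathlib
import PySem

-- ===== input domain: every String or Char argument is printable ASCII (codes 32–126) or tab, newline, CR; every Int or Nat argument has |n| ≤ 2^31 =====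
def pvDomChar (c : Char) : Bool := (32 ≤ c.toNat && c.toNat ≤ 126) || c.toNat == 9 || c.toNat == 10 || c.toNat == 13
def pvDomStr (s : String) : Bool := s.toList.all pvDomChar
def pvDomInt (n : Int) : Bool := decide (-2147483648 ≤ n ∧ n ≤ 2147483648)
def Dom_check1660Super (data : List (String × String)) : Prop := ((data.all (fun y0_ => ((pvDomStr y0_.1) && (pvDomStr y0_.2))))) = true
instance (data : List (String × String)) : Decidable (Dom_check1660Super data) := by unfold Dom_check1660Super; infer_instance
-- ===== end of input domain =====

-- B replaces A's character-by-character pop-a-sentinel-list state machine by anchor-at-first-'1' plus one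
-- fixed-slice comparison (simpler decomposition); equivalence of RETURN values only, proved outside D_ below.

-- ===== PORT A =====
def pvCode : List Char := ['1', '6', '6', '0', 'S', 'U', 'P', 'E', 'R', '*']

-- the for-loop of A: state = (remaining code list, hit); returns the final code list
def pvLoopA : List Char → List Char → Nat → List Char
  | [], code, _ => code
  | _ :: _, [], _ => []        -- Python raises IndexError (code[0] on empty list) here; excluded by Pre_
  | c :: rest, k :: ks, hit =>
    if PySem.Chars.upperChar c = k then pvLoopA rest ks (hit + 1)
    else if hit ≠ 0 then k :: ks
    else pvLoopA rest (k :: ks) hit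

def check1660Super (data : List (String × String)) : Bool :=
  match (PySem.Dict.mk data).get? "nome" with
  | none => false               -- Python raises KeyError here; excluded by Pre_
  | some s =>
    let nome := PySem.Chars.replace (PySem.Chars.replace s.toList [' '] []) [','] []
    decide ((pvLoopA nome pvCode 0).length = 1)

-- ===== PORT B =====
def check1660Super_alt (data : List (String × String)) : Bool :=
  match (PySem.Dict.mk data).get? "nome" with
  | none => false               -- Python raises KeyError here; excluded by Pre_
  | some s =>
    let nome := PySem.Chars.upper (PySem.Chars.replace (PySem.Chars.replace s.toList [' '] []) [','] [])
    let i := PySem.Chars.find nome ['1']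
    if i = -1 then false
    else decide (PySem.Chars.slice nome (some i) (some (i + 9)) = "1660SUPER".toList)

-- ===== PRECONDITION & SPEC =====
-- data['nome'] with spaces and commas removed and uppercased, cut at its first '1' ('1' has no case, so
-- this is where A's matching anchors); none when the key is absent
def pvCleanTail (data : List (String × String)) : Option (List Char) :=
  ((PySem.Dict.mk data).get? "nome").map fun s =>
    let u := (s.toList.removeAll [' ', ',']).map PySem.Chars.upperChar
    u.drop (u.idxOf '1')

-- Pre_ excludes exactly the inputs where A raises: a missing 'nome' key (KeyError) and names whose cleaned
-- uppercased form continues past '1660SUPER*' anchored at the first '1' (A pops its '*' sentinel, empties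
-- the code list and indexes it: IndexError).
def Pre_check1660Super (data : List (String × String)) : Prop :=
  (pvCleanTail data).elim false
    (fun t => !(decide ("1660SUPER*".toList <+: t) && decide (t ≠ "1660SUPER*".toList))) = true
instance (data : List (String × String)) : Decidable (Pre_check1660Super data) := by
  unfold Pre_check1660Super; infer_instance

def pvWitness_check1660Super : (List (String × String)) := [("nome", "GTX 1660 Super")]

-- On names whose cleaned uppercased form ends exactly in '1660SUPER*' (anchored at the first '1') A returns
-- False because its sentinel '*' is itself consumed, while B returns True; the name does contain the
-- 1660SUPER pattern, so B's True is the intended value.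
def D_check1660Super (data : List (String × String)) : Prop :=
  pvCleanTail data = some "1660SUPER*".toList
instance (data : List (String × String)) : Decidable (D_check1660Super data) := by
  unfold D_check1660Super; infer_instance

def Spec_check1660Super (data : List (String × String)) (out : Bool) : Prop :=
  ¬ D_check1660Super data → out = check1660Super_alt data
instance (data : List (String × String)) (out : Bool) : Decidable (Spec_check1660Super data out) := by
  unfold Spec_check1660Super; infer_instance

def pvDiffWitness_check1660Super : (List (String × String)) := [("nome", "1660SUPER*")]
def pvDiffWitnessOut_check1660Super : Bool × Bool := (false, true)

-- ===== CLAIM (what is proved, stated in full; the proofs are below) =====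
def Claim_unchanged_check1660Super : Prop := ∀ (data : List (String × String)), Dom_check1660Super data → Pre_check1660Super data → Spec_check1660Super data (check1660Super data)
def Claim_changed_check1660Super : Prop := Dom_check1660Super (pvDiffWitness_check1660Super) ∧ Pre_check1660Super (pvDiffWitness_check1660Super) ∧ D_check1660Super (pvDiffWitness_check1660Super) ∧ check1660Super (pvDiffWitness_check1660Super) = pvDiffWitnessOut_check1660Super.1 ∧ check1660Super_alt (pvDiffWitness_check1660Super) = pvDiffWitnessOut_check1660Super.2 ∧ pvDiffWitnessOut_check1660Super.1 ≠ pvDiffWitnessOut_check1660Super.2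
def Claim_exact_check1660Super : Prop := ∀ (data : List (String × String)), Dom_check1660Super data → Pre_check1660Super data → D_check1660Super data → check1660Super data ≠ check1660Super_alt data

-- ===== LEMMAS AND PROOFS =====
theorem pvLoopA_nil_code : ∀ (cs : List Char) (hit : Nat), pvLoopA cs [] hit = [] := by
  intro cs hit; cases cs <;> rfl

theorem pv_prefix_singleton {c : Char} {l : List Char} : [c] <+: l ↔ l.head? = some c := by
  cases l with
  | nil => simp
  | cons x t => simp [List.cons_prefix_cons, eq_comm]

theorem pv_idxOf_min (c : Char) : ∀ (l : List Char) (m : Nat), l[m]? = some c → l.idxOf c ≤ m := by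
  intro l
  induction l with
  | nil => intro m h; simp at h
  | cons x t ih =>
    intro m h
    by_cases hx : x = c
    · simp [hx]
    · cases m with
      | zero => simp at h; exact absurd h hx
      | succ m' =>
        simp only [List.getElem?_cons_succ] at h
        have := ih m' h
        simp [hx]
        omega

theorem pv_find_singleton (u : List Char) (c : Char) :
    PySem.Chars.find u [c] = if c ∈ u then ((u.idxOf c : Nat) : Int) else -1 := by
  by_cases hc : c ∈ u
  · have hinf : [c] <:+: u := by
      obtain ⟨s, t, rfl⟩ := List.append_of_mem hc
      exact ⟨s, t, by simp⟩
    have h0 : 0 ≤ PySem.Chars.find u [c] := (PySem.Chars.find_nonneg_iff u [c]).2 hinf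
    obtain ⟨hpre, hmin⟩ := PySem.Chars.find_spec h0
    have hi : u[(PySem.Chars.find u [c]).toNat]? = some c := by
      rw [← List.head?_drop]; exact pv_prefix_singleton.1 hpre
    have h1 : u.idxOf c ≤ (PySem.Chars.find u [c]).toNat := pv_idxOf_min c u _ hi
    have hjlt : u.idxOf c < u.length := List.idxOf_lt_length_of_mem hc
    have hj : u[u.idxOf c]? = some c := by
      rw [List.getElem?_eq_getElem hjlt]; simp [List.getElem_idxOf hjlt]
    have h2 : ¬ (u.idxOf c < (PySem.Chars.find u [c]).toNat) := by
      intro hlt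
      exact hmin _ hlt (pv_prefix_singleton.2 (by rw [List.head?_drop]; exact hj))
    have : (PySem.Chars.find u [c]).toNat = u.idxOf c := by omega
    rw [if_pos hc, ← this, Int.toNat_of_nonneg h0]
  · rw [if_neg hc]
    apply (PySem.Chars.find_eq_neg_one_iff u [c]).2
    intro hinf
    exact hc (hinf.sublist.subset (by simp))

theorem pv_append_singleton_prefix (p : List Char) (c : Char) (l : List Char) :
    p ++ [c] <+: l ↔ (p <+: l ∧ (l.drop p.length).head? = some c) := by
  constructor
  · rintro ⟨t, rfl⟩
    refine ⟨⟨[c] ++ t, by simp⟩, ?_⟩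
    simp
  · rintro ⟨⟨r, rfl⟩, hh⟩
    rw [List.drop_append] at hh
    simp at hh
    obtain ⟨t, rfl⟩ := pv_prefix_singleton.2 hh
    exact ⟨t, by simp⟩

theorem pv_loopA_match : ∀ (cs ks : List Char) (hit : Nat),
    ((pvLoopA cs (ks ++ ['*']) (hit + 1)).length = 1) ↔
      (ks <+: cs.map PySem.Chars.upperChar ∧
        ((cs.map PySem.Chars.upperChar).drop ks.length).head? ≠ some '*') := by
  intro cs
  induction cs with
  | nil =>
    intro ks hit
    simp only [pvLoopA, List.length_append, List.map_nil, List.drop_nil, List.head?_nil]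
    simp [List.prefix_nil]
  | cons c r ih =>
    intro ks hit
    cases ks with
    | nil =>
      by_cases h : PySem.Chars.upperChar c = '*'
      · simp only [List.nil_append, pvLoopA, if_pos h, pvLoopA_nil_code]
        simp [h]
      · simp only [List.nil_append, pvLoopA, if_neg h]
        simp [h]
    | cons k ks' =>
      by_cases h : PySem.Chars.upperChar c = k
      · simp only [List.cons_append, pvLoopA, if_pos h]
        rw [ih ks' (hit + 1)]
        simp [List.cons_prefix_cons, h]
      · have h' : ¬ k = PySem.Chars.upperChar c := fun hk => h hk.symm
        simp only [List.cons_append, pvLoopA, if_neg h]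
        simp [List.cons_prefix_cons, h']

theorem pv_loopA_full : ∀ (cs : List Char),
    ((pvLoopA cs ("1660SUPER".toList ++ ['*']) 0).length = 1) ↔
      ("660SUPER".toList <+:
          (cs.map PySem.Chars.upperChar).drop ((cs.map PySem.Chars.upperChar).idxOf '1' + 1) ∧
        (((cs.map PySem.Chars.upperChar).drop
            ((cs.map PySem.Chars.upperChar).idxOf '1' + 1)).drop 8).head? ≠ some '*') := by
  intro cs
  induction cs with
  | nil => simp [pvLoopA]
  | cons c r ih =>
    by_cases h : PySem.Chars.upperChar c = '1'
    · have : pvLoopA (c :: r) ("1660SUPER".toList ++ ['*']) 0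
          = pvLoopA r ("660SUPER".toList ++ ['*']) 1 := by
        show pvLoopA (c :: r) ('1' :: ("660SUPER".toList ++ ['*'])) 0 = _
        simp [pvLoopA, h]
      rw [this, pv_loopA_match r "660SUPER".toList 0]
      simp [h]
    · have : pvLoopA (c :: r) ("1660SUPER".toList ++ ['*']) 0
          = pvLoopA r ("1660SUPER".toList ++ ['*']) 0 := by
        show pvLoopA (c :: r) ('1' :: ("660SUPER".toList ++ ['*'])) 0 = _
        simp [pvLoopA, h]
      rw [this, ih]
      simp [h, List.drop_succ_cons]

-- B's branch-and-slice computation, characterised as one prefix test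
theorem pv_altB_char (u : List Char) :
    (if PySem.Chars.find u ['1'] = -1 then false
     else decide (PySem.Chars.slice u (some (PySem.Chars.find u ['1']))
        (some (PySem.Chars.find u ['1'] + 9)) = "1660SUPER".toList))
    = decide ("660SUPER".toList <+: u.drop (u.idxOf '1' + 1)) := by
  by_cases h1 : '1' ∈ u
  · rw [pv_find_singleton u '1', if_pos h1]
    have hjlt : u.idxOf '1' < u.length := List.idxOf_lt_length_of_mem h1
    rw [if_neg (by omega)]
    have h9 : ((u.idxOf '1' : Nat) : Int) + 9 = ((u.idxOf '1' : Nat) : Int) + ((9 : Nat) : Int) := by norm_num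
    rw [PySem.Chars.slice_eq_listSlice, h9, PySem.List.slice_natCast_add]
    have hdrop : u.drop (u.idxOf '1') = '1' :: u.drop (u.idxOf '1' + 1) := by
      rw [List.drop_eq_getElem_cons hjlt]
      simp [List.getElem_idxOf hjlt]
    rw [hdrop]
    have hpat : "1660SUPER".toList = '1' :: "660SUPER".toList := rfl
    have hiff : ('1' :: (u.drop (u.idxOf '1' + 1)).take 8 = "1660SUPER".toList)
        ↔ ("660SUPER".toList <+: u.drop (u.idxOf '1' + 1)) := by
      rw [hpat, List.cons.injEq]
      rw [List.prefix_iff_eq_take]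
      simp [eq_comm]
    simp only [List.take_succ_cons]
    exact decide_eq_decide.mpr hiff
  · rw [pv_find_singleton u '1', if_neg h1, if_pos rfl]
    have : u.idxOf '1' = u.length := List.idxOf_eq_length_iff.2 h1
    rw [this]
    have : u.drop (u.length + 1) = [] := List.drop_eq_nil_of_le (by omega)
    rw [this]
    simp [List.prefix_nil]

-- the two ports, reduced to the two prefix conditions on the cleaned uppercased name
theorem pv_ports_reduced (data : List (String × String)) (s : String)
    (hget : (PySem.Dict.mk data).get? "nome" = some s) :
    (check1660Super data
        = decide ("660SUPER".toList <+:
            ((PySem.Chars.replace (PySem.Chars.replace s.toList [' '] []) [','] []).map PySem.Chars.upperChar).drop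
              (((PySem.Chars.replace (PySem.Chars.replace s.toList [' '] []) [','] []).map PySem.Chars.upperChar).idxOf '1' + 1) ∧
          ((((PySem.Chars.replace (PySem.Chars.replace s.toList [' '] []) [','] []).map PySem.Chars.upperChar).drop
              (((PySem.Chars.replace (PySem.Chars.replace s.toList [' '] []) [','] []).map PySem.Chars.upperChar).idxOf '1' + 1)).drop 8).head? ≠ some '*'))
      ∧ check1660Super_alt data
        = decide ("660SUPER".toList <+:
            ((PySem.Chars.replace (PySem.Chars.replace s.toList [' '] []) [','] []).map PySem.Chars.upperChar).drop
              (((PySem.Chars.replace (PySem.Chars.replace s.toList [' '] []) [','] []).map PySem.Chars.upperChar).idxOf '1' + 1)) := by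
  constructor
  · unfold check1660Super
    rw [hget]
    have hcode : pvCode = "1660SUPER".toList ++ ['*'] := rfl
    rw [hcode]
    exact decide_eq_decide.mpr (pv_loopA_full _)
  · unfold check1660Super_alt
    rw [hget]
    have hup : PySem.Chars.upper = fun s => List.map PySem.Chars.upperChar s := rfl
    rw [hup]
    exact pv_altB_char _

-- ===== VERDICT (by name: the statement is the Claim_ definition above) =====
theorem pv_replace_go_single (a : Char) :
    ∀ (fuel : Nat) (l acc : List Char), l.length ≤ fuel →
      PySem.Chars.replace.go [a] [] fuel l acc
        = acc.reverse ++ l.filter (fun c => !(c == a)) := by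
  intro fuel
  induction fuel with
  | zero =>
    intro l acc h
    cases l with
    | nil => simp [PySem.Chars.replace.go]
    | cons c t => simp at h
  | succ n ih =>
    intro l acc h
    cases l with
    | nil => simp [PySem.Chars.replace.go]
    | cons c t =>
      by_cases hc : a = c
      · have hpre : [a].isPrefixOf (c :: t) = true := by simp [List.isPrefixOf, hc]
        simp only [PySem.Chars.replace.go, hpre, if_pos]
        rw [show List.drop [a].length (c :: t) = t from rfl,
          show ([] : List Char).reverse ++ acc = acc from by simp]
        rw [ih t acc (by simpa using h)]
        simp [← hc]
      · have hpre : [a].isPrefixOf (c :: t) = false := by simp [List.isPrefixOf, hc]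
        simp only [PySem.Chars.replace.go, hpre]
        rw [if_neg (by simp)]
        rw [ih t (c :: acc) (by simpa using h)]
        have hc' : ¬ c = a := fun h' => hc h'.symm
        simp [hc']

theorem pv_replace_single (l : List Char) (a : Char) :
    PySem.Chars.replace l [a] [] = l.filter (fun c => !(c == a)) := by
  rw [PySem.Chars.replace]
  rw [if_neg (by simp)]
  rw [pv_replace_go_single a l.length l [] le_rfl]
  simp

theorem pv_clean_eq (s : String) :
    PySem.Chars.replace (PySem.Chars.replace s.toList [' '] []) [','] []
      = s.toList.filter (fun c => !(c == ' ' || c == ',')) := by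
  rw [pv_replace_single, pv_replace_single, List.filter_filter]
  congr 1
  funext c
  cases hsp : (c == ' ') <;> cases hcm : (c == ',') <;> simp_all

theorem pv_cleanTail_eq (data : List (String × String)) (s : String)
    (hget : (PySem.Dict.mk data).get? "nome" = some s) :
    pvCleanTail data
      = some ((((PySem.Chars.replace (PySem.Chars.replace s.toList [' '] []) [','] []).map
            PySem.Chars.upperChar)).drop
          (((PySem.Chars.replace (PySem.Chars.replace s.toList [' '] []) [','] []).map
            PySem.Chars.upperChar).idxOf '1')) := by
  rw [pvCleanTail, hget, Option.map_some, pv_clean_eq]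
  have : s.toList.removeAll [' ', ','] = s.toList.filter (fun c => !(c == ' ' || c == ',')) := by
    rw [List.removeAll]
    congr 1
    funext c
    cases h1 : (c == ' ') <;> cases h2 : (c == ',') <;>
      simp_all [beq_iff_eq, beq_eq_false_iff_ne]
  rw [this]

theorem pv_star_split (u : List Char) (n : Nat) :
    ("660SUPER*".toList <+: u.drop n) ↔
      ("660SUPER".toList <+: u.drop n ∧ ((u.drop n).drop 8).head? = some '*') := by
  rw [show ("660SUPER*".toList) = "660SUPER".toList ++ ['*'] from rfl,
    pv_append_singleton_prefix]
  rfl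

theorem pv_mem_one_of_star (u : List Char) (hstar9 : "660SUPER*".toList <+: u.drop (u.idxOf '1' + 1)) :
    '1' ∈ u := by
  by_contra hmem
  have hj' : u.idxOf '1' = u.length := List.idxOf_eq_length_iff.2 hmem
  rw [hj', List.drop_eq_nil_of_le (by omega)] at hstar9
  simp [List.prefix_nil] at hstar9

theorem pv_drop_idx (u : List Char) (hmem : '1' ∈ u) :
    u.drop (u.idxOf '1') = '1' :: u.drop (u.idxOf '1' + 1) := by
  have hjlt : u.idxOf '1' < u.length := List.idxOf_lt_length_of_mem hmem
  rw [List.drop_eq_getElem_cons hjlt]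
  simp [List.getElem_idxOf hjlt]

theorem check1660Super_spec : Claim_unchanged_check1660Super := by
  intro data hdom hpre hnd
  show check1660Super data = check1660Super_alt data
  cases hget : (PySem.Dict.mk data).get? "nome" with
  | none => simp [check1660Super, check1660Super_alt, hget]
  | some s =>
    obtain ⟨hA, hB⟩ := pv_ports_reduced data s hget
    rw [hA, hB]
    set stp := PySem.Chars.replace (PySem.Chars.replace s.toList [' '] []) [','] [] with hstp
    set u := stp.map PySem.Chars.upperChar with hu
    set j := u.idxOf '1' with hj
    have hct : pvCleanTail data = some (u.drop j) := pv_cleanTail_eq data s hget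
    by_cases hp : "660SUPER".toList <+: u.drop (j + 1)
    · by_cases hq : ((u.drop (j + 1)).drop 8).head? = some '*'
      · exfalso
        have hstar9 : "660SUPER*".toList <+: u.drop (j + 1) :=
          (pv_star_split u (j + 1)).2 ⟨hp, hq⟩
        have hmem : '1' ∈ u := pv_mem_one_of_star u (hj ▸ hstar9)
        have hdropj : u.drop j = '1' :: u.drop (j + 1) := by rw [hj]; exact pv_drop_idx u hmem
        have hpre10 : "1660SUPER*".toList <+: u.drop j := by
          rw [hdropj, show ("1660SUPER*".toList) = '1' :: "660SUPER*".toList from rfl]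
          exact List.cons_prefix_cons.2 ⟨rfl, hstar9⟩
        by_cases hend : u.drop j = "1660SUPER*".toList
        · exact hnd (by rw [D_check1660Super, hct, hend])
        · have hpr := hpre
          rw [Pre_check1660Super, hct] at hpr
          simp only [Option.elim_some] at hpr
          rw [decide_eq_true hpre10, decide_eq_true hend] at hpr
          simp at hpr
      · have hq' : u[j + 1 + 8]? ≠ some '*' := by
          rwa [List.head?_drop, List.getElem?_drop] at hq
        have hp' : ['6', '6', '0', 'S', 'U', 'P', 'E', 'R'] <+: List.drop (j + 1) u := hp
        simp [hp', hq']
    · have hp' : ¬ ['6', '6', '0', 'S', 'U', 'P', 'E', 'R'] <+: List.drop (j + 1) u := hp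
      simp [hp']

theorem check1660Super_changed : Claim_changed_check1660Super := by
  unfold Claim_changed_check1660Super; decide

theorem check1660Super_tight : Claim_exact_check1660Super := by
  intro data hdom hpre hd
  cases hget : (PySem.Dict.mk data).get? "nome" with
  | none =>
    exfalso
    rw [D_check1660Super, pvCleanTail, hget] at hd
    simp at hd
  | some s =>
    obtain ⟨hA, hB⟩ := pv_ports_reduced data s hget
    rw [hA, hB]
    set stp := PySem.Chars.replace (PySem.Chars.replace s.toList [' '] []) [','] [] with hstp
    set u := stp.map PySem.Chars.upperChar with hu
    set j := u.idxOf '1' with hj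
    have hct : pvCleanTail data = some (u.drop j) := pv_cleanTail_eq data s hget
    rw [D_check1660Super, hct, Option.some.injEq] at hd
    have hmem : '1' ∈ u := by
      by_contra hmem
      have hj' : j = u.length := by rw [hj]; exact List.idxOf_eq_length_iff.2 hmem
      rw [hj', List.drop_eq_nil_of_le (by omega)] at hd
      exact absurd hd.symm (by simp)
    have hdropj : u.drop j = '1' :: u.drop (j + 1) := by rw [hj]; exact pv_drop_idx u hmem
    have htail : u.drop (j + 1) = "660SUPER*".toList := by
      have := hdropj ▸ hd
      have h2 := (List.cons.injEq '1' (u.drop (j + 1)) '1' ("660SUPER*".toList)).mp this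
      exact h2.2
    have hstar9 : "660SUPER*".toList <+: u.drop (j + 1) := htail ▸ List.prefix_refl _
    obtain ⟨hp, hq⟩ := (pv_star_split u (j + 1)).1 hstar9
    have hq' : u[j + 1 + 8]? = some '*' := by
      rwa [List.head?_drop, List.getElem?_drop] at hq
    have hp' : ['6', '6', '0', 'S', 'U', 'P', 'E', 'R'] <+: List.drop (j + 1) u := hp
    simp [hp', hq']
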